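-- pv_equiv track=rewrite | github.com/shihwesley/chronicler | chronicler/vcs/crawler.py | _matches_key_file
-- ===== SOURCE A (Python) =====
-- import fnmatch
--
-- KEY_FILES: list[str] = [
--     # Package manifests
--     "package.json",
--     "pyproject.toml",
--     "Cargo.toml",
--     "go.mod",
--     "setup.cfg",
--     "setup.py",
--     "pom.xml",
--     "build.gradle",
--     "build.gradle.kts",
--     # Monorepo
--     "lerna.json",
--     "pnpm-workspace.yaml",
--     "nx.json",
--     "rush.json",
--     "turbo.json",
--     # Config
--     "tsconfig.json",
--     "Dockerfile",
--     "docker-compose.yml",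
--     "docker-compose.yaml",
--     "Makefile",
--     # Docs
--     "README.md",
--     "CHANGELOG.md",
--     # CI (glob)
--     ".github/workflows/*.yml",
--     ".github/workflows/*.yaml",
--     ".gitlab-ci.yml",
-- ]
--
-- def _matches_key_file(path: str) -> bool:
--     """Check if a file path matches any KEY_FILES pattern."""
--     name = path.rsplit("/", 1)[-1] if "/" in path else path
--     for pattern in KEY_FILES:
--         # Patterns with '/' match against full path, others match filename only
--         if "/" in pattern:
--             if fnmatch.fnmatch(path, pattern):
--                 return True
--         else:
--             if fnmatch.fnmatch(name, pattern):
--                 return True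
--     return False
-- ===== SOURCE B (Python) =====
-- # Simpler: one set-membership test on the filename plus a direct prefix/suffix
-- # test for the two workflow globs, instead of a 25-pattern fnmatch loop.
--
-- _EXACT_NAMES = frozenset([
--     "package.json", "pyproject.toml", "Cargo.toml", "go.mod", "setup.cfg",
--     "setup.py", "pom.xml", "build.gradle", "build.gradle.kts",
--     "lerna.json", "pnpm-workspace.yaml", "nx.json", "rush.json", "turbo.json",
--     "tsconfig.json", "Dockerfile", "docker-compose.yml", "docker-compose.yaml",
--     "Makefile", "README.md", "CHANGELOG.md", ".gitlab-ci.yml",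
-- ])
--
-- def _matches_key_file(path: str) -> bool:
--     """Check if a file path matches any KEY_FILES pattern."""
--     name = path.rsplit("/", 1)[-1]
--     if name in _EXACT_NAMES:
--         return True
--     return path.startswith(".github/workflows/") and (
--         path.endswith(".yml") or path.endswith(".yaml"))
-- ===== Notes on version B (the rewrite author's own statement) =====
-- stated objective: simpler
-- what changed: Replaces the per-pattern fnmatch loop with one frozenset membership test on the filename plus a direct startswith/endswith test for the two workflow glob patterns (all other KEY_FILES patterns are wildcard-free, so fnmatch on them is plain equality).
import Mathlib
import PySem

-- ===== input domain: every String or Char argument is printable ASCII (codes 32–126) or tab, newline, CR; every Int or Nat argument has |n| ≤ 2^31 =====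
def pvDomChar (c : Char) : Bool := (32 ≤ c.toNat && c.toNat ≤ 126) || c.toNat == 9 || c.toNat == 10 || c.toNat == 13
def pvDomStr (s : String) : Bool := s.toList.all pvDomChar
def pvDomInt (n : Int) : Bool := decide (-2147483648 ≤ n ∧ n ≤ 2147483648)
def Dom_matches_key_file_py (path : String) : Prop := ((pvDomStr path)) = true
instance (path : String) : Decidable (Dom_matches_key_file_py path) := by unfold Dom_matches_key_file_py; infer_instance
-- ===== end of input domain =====

-- B replaces A's 25-pattern fnmatch loop by one membership test of the filename in the
-- set of wildcard-free patterns plus a direct prefix/suffix test for the two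
-- '.github/workflows/*' globs (objective: simpler).

-- ===== PORT A =====

-- Port of fnmatch.fnmatch(s, pat) for patterns made of literal characters and '*'
-- (every KEY_FILES pattern is of this form: no '?', no '['): exact there, with POSIX
-- os.path.normcase = identity; fnmatch's '*' matches ANY characters, '/' included.
-- globStar rec s = does `rec` accept some suffix of s (the regex '.*' before the rest).
def globStar (rec : List Char → Bool) : List Char → Bool
  | [] => rec []
  | d :: s => rec (d :: s) || globStar rec s

def globMatch : List Char → List Char → Bool
  | [], s => s.isEmpty
  | c :: p, s =>
      if c = '*' then globStar (globMatch p) s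
      else match s with
        | [] => false
        | d :: s' => (c == d) && globMatch p s'

-- exact port of path.rsplit("/", 1)[-1]: the characters after the last '/'
def aLastSeg (cs : List Char) : List Char := (cs.reverse.takeWhile (fun c => c != '/')).reverse

def KEY_FILES : List String := [
    "package.json", "pyproject.toml", "Cargo.toml", "go.mod", "setup.cfg",
    "setup.py", "pom.xml", "build.gradle", "build.gradle.kts",
    "lerna.json", "pnpm-workspace.yaml", "nx.json", "rush.json", "turbo.json",
    "tsconfig.json", "Dockerfile", "docker-compose.yml", "docker-compose.yaml",
    "Makefile", "README.md", "CHANGELOG.md",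
    ".github/workflows/*.yml", ".github/workflows/*.yaml", ".gitlab-ci.yml"]

-- the for-loop with its early returns
def aLoop (pats : List String) (path name : List Char) : Bool :=
  match pats with
  | [] => false
  | pat :: rest =>
      if PySem.Chars.isIn ['/'] pat.toList then
        if globMatch pat.toList path then true else aLoop rest path name
      else
        if globMatch pat.toList name then true else aLoop rest path name

def matches_key_file_py (path : String) : Bool :=
  let name := if PySem.Chars.isIn ['/'] path.toList then aLastSeg path.toList else path.toList
  aLoop KEY_FILES path.toList name

-- ===== PORT B =====

-- the module-level frozenset of wildcard-free pattern names
def bExactNames : PySem.Set (List Char) := PySem.Set.ofList [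
    "package.json".toList, "pyproject.toml".toList, "Cargo.toml".toList, "go.mod".toList,
    "setup.cfg".toList, "setup.py".toList, "pom.xml".toList, "build.gradle".toList,
    "build.gradle.kts".toList, "lerna.json".toList, "pnpm-workspace.yaml".toList,
    "nx.json".toList, "rush.json".toList, "turbo.json".toList, "tsconfig.json".toList,
    "Dockerfile".toList, "docker-compose.yml".toList, "docker-compose.yaml".toList,
    "Makefile".toList, "README.md".toList, "CHANGELOG.md".toList, ".gitlab-ci.yml".toList]

-- exact port of path.rsplit("/", 1)[-1]: the characters after the last '/'
def bLastName (cs : List Char) : List Char := (cs.reverse.takeWhile (fun c => c != '/')).reverse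

def matches_key_file_py_alt (path : String) : Bool :=
  let name := bLastName path.toList
  if PySem.Set.contains bExactNames name then true
  else
    PySem.Chars.startswith path.toList (".github/workflows/".toList) &&
      (PySem.Chars.endswith path.toList (".yml".toList) ||
       PySem.Chars.endswith path.toList (".yaml".toList))

-- ===== PRECONDITION & SPEC =====
def Spec_matches_key_file_py (path : String) (out : Bool) : Prop := out = matches_key_file_py_alt path
instance (path : String) (out : Bool) : Decidable (Spec_matches_key_file_py path out) := by unfold Spec_matches_key_file_py; infer_instance

-- ===== CLAIM (what is proved, stated in full; the proofs are below) =====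
def Claim_equal_matches_key_file_py : Prop := ∀ (path : String), Dom_matches_key_file_py path → Spec_matches_key_file_py path (matches_key_file_py path)

-- ===== LEMMAS AND PROOFS =====

-- a literal (star-free) pattern matches exactly itself
theorem glob_lit (p : List Char) (h : '*' ∉ p) : ∀ s, globMatch p s = decide (s = p) := by
  induction p with
  | nil => intro s; cases s <;> simp [globMatch]
  | cons c p ih =>
      intro s
      have hc : c ≠ '*' := fun hc => h (hc ▸ List.mem_cons_self)
      have hp : '*' ∉ p := fun hp => h (List.mem_cons_of_mem _ hp)
      cases s with
      | nil => simp [globMatch, hc]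
      | cons d s' =>
          have hstep : globMatch (c :: p) (d :: s') = ((c == d) && globMatch p s') := by
            simp [globMatch, hc]
          rw [hstep, ih hp s']
          by_cases h1 : c = d
          · subst h1
            by_cases h2 : s' = p
            · subst h2; simp
            · simp [h2, List.cons.injEq]
          · simp [h1, Ne.symm h1, List.cons.injEq]

-- '*' followed by a literal tail matches exactly the strings with that suffix
theorem glob_star (p : List Char) (h : '*' ∉ p) : ∀ s, globStar (globMatch p) s = decide (p <:+ s) := by
  intro s
  induction s with
  | nil => simp [globStar, glob_lit p h, List.suffix_nil, eq_comm]
  | cons d s' ih =>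
      simp [globStar, glob_lit p h, ih, List.suffix_cons_iff, eq_comm]
      try tauto

-- a literal prefix of the pattern must match literally
theorem glob_pre (pre : List Char) (h : '*' ∉ pre) (p : List Char) :
    ∀ s, globMatch (pre ++ p) s = (decide (pre <+: s) && globMatch p (s.drop pre.length)) := by
  induction pre with
  | nil => intro s; simp
  | cons c pre ih =>
      intro s
      have hc : c ≠ '*' := fun hc => h (hc ▸ List.mem_cons_self)
      have hp : '*' ∉ pre := fun hp => h (List.mem_cons_of_mem _ hp)
      cases s with
      | nil => simp [globMatch, hc]
      | cons d s' =>
          simp [globMatch, hc, ih hp s', List.cons_prefix_cons]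
          by_cases hd : c = d <;> simp [hd]

theorem glob_step_star (p : List Char) (s : List Char) :
    globMatch ('*' :: p) s = globStar (globMatch p) s := by simp [globMatch]

-- the two workflow glob patterns, characterised
theorem glob_yml (s : List Char) :
    globMatch ".github/workflows/*.yml".toList s =
      (decide (".github/workflows/".toList <+: s) && decide (".yml".toList <:+ s.drop 18)) := by
  have e : ".github/workflows/*.yml".toList =
      ".github/workflows/".toList ++ '*' :: ".yml".toList := by decide
  rw [e, glob_pre _ (by decide), glob_step_star, glob_star _ (by decide)]
  rfl

theorem glob_yaml (s : List Char) :
    globMatch ".github/workflows/*.yaml".toList s =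
      (decide (".github/workflows/".toList <+: s) && decide (".yaml".toList <:+ s.drop 18)) := by
  have e : ".github/workflows/*.yaml".toList =
      ".github/workflows/".toList ++ '*' :: ".yaml".toList := by decide
  rw [e, glob_pre _ (by decide), glob_step_star, glob_star _ (by decide)]
  rfl

-- no-overlap: with the 18-char workflow prefix present, a suffix starting with '.'
-- cannot begin inside the prefix, so testing it on the whole string is equivalent
theorem suffix_drop18_iff (suf l : List Char)
    (hp : ".github/workflows/".toList <+: l)
    (hhead : suf.head? = some '.')
    (hdot : '.' ∉ ".github/workflows/".toList.drop (18 - suf.length)) :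
    (suf <:+ l.drop 18 ↔ suf <:+ l) := by
  constructor
  · exact fun h => h.trans (List.drop_suffix _ _)
  · intro hs
    obtain ⟨t, ht⟩ := hs
    by_cases hlen : 18 ≤ t.length
    · exact ⟨t.drop 18, by rw [← ht, List.drop_append_of_le_length hlen]⟩
    · exfalso
      have hpre18 : (".github/workflows/".toList).length = 18 := by decide
      have htpre : t <+: l := ⟨suf, ht⟩
      have htp : t <+: ".github/workflows/".toList :=
        List.prefix_of_prefix_length_le htpre hp (by omega)
      obtain ⟨v, hv⟩ := htp
      obtain ⟨u, hu⟩ := hp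
      have hsuf : suf = v ++ u := by
        have h2 : t ++ suf = t ++ (v ++ u) := by
          rw [ht, ← hu, ← hv, List.append_assoc]
        exact (List.append_cancel_left h2)
      have hlsuf : 18 - suf.length ≤ t.length := by
        have h3 : t.length + suf.length = l.length := by
          rw [← ht]; simp
        have h4 : l.length = 18 + u.length := by
          rw [← hu, List.length_append, hpre18]
        omega
      cases v with
      | nil =>
          have h5 := congrArg List.length hv
          rw [List.length_append, hpre18] at h5
          simp at h5
          omega
      | cons c v' =>
          have hc : c = '.' := by
            rw [hsuf] at hhead; simp at hhead; exact hhead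
          have hvdrop : c :: v' = ".github/workflows/".toList.drop t.length := by
            rw [← hv, List.drop_left]
          have h1 : '.' ∈ ".github/workflows/".toList.drop t.length := by
            rw [← hvdrop, hc]; exact List.mem_cons_self
          have h2 : ".github/workflows/".toList.drop t.length ⊆
              ".github/workflows/".toList.drop (18 - suf.length) := by
            rw [show t.length = (18 - suf.length) + (t.length - (18 - suf.length)) from by omega,
              ← List.drop_drop]
            exact List.drop_subset _ _
          exact hdot (h2 h1)

-- rsplit("/",1)[-1] is the identity on strings without '/'
theorem aLastSeg_of_not_mem (l : List Char) (h : '/' ∉ l) : aLastSeg l = l := by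
  unfold aLastSeg
  rw [List.takeWhile_eq_self_iff.mpr, List.reverse_reverse]
  intro a ha
  simp only [bne_iff_ne, ne_eq]
  exact fun he => h (he ▸ (List.mem_reverse.mp ha))

-- A's conditional rsplit equals B's unconditional one
theorem aName_eq (l : List Char) :
    (if PySem.Chars.isIn ['/'] l then aLastSeg l else l) = bLastName l := by
  by_cases h : PySem.Chars.isIn ['/'] l = true
  · simp [h]; rfl
  · have hb : PySem.Chars.isIn ['/'] l = false := by
      cases hx : PySem.Chars.isIn ['/'] l
      · rfl
      · exact absurd hx h
    have hnm : '/' ∉ l := by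
      intro hm
      obtain ⟨s, t, hst⟩ := List.append_of_mem hm
      have : (['/'] : List Char) <:+: l := ⟨s, t, by simp [hst]⟩
      rw [PySem.Chars.isIn_eq_false_iff] at hb
      exact hb this
    rw [hb]
    simp only [Bool.false_eq_true, if_false]
    show l = bLastName l
    exact (aLastSeg_of_not_mem l hnm).symm

theorem aLoop_nil (path name : List Char) : aLoop [] path name = false := rfl

theorem aLoop_lit (pat : String) (rest : List String) (path name : List Char)
    (h : PySem.Chars.isIn ['/'] pat.toList = false) :
    aLoop (pat :: rest) path name = (globMatch pat.toList name || aLoop rest path name) := by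
  simp only [aLoop, h]
  cases hg : globMatch pat.toList name <;> simp

theorem aLoop_glob (pat : String) (rest : List String) (path name : List Char)
    (h : PySem.Chars.isIn ['/'] pat.toList = true) :
    aLoop (pat :: rest) path name = (globMatch pat.toList path || aLoop rest path name) := by
  simp only [aLoop, h]
  cases hg : globMatch pat.toList path <;> simp

set_option maxHeartbeats 2000000 in
theorem aLoop_eval (path name : List Char) :
    aLoop KEY_FILES path name =
      (PySem.Set.contains bExactNames name ||
        (decide (".github/workflows/".toList <+: path) &&
          (decide (".yml".toList <:+ path.drop 18) || decide (".yaml".toList <:+ path.drop 18)))) := by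
  unfold KEY_FILES
  rw [
      aLoop_lit "package.json" _ _ _ (by decide),
      aLoop_lit "pyproject.toml" _ _ _ (by decide),
      aLoop_lit "Cargo.toml" _ _ _ (by decide),
      aLoop_lit "go.mod" _ _ _ (by decide),
      aLoop_lit "setup.cfg" _ _ _ (by decide),
      aLoop_lit "setup.py" _ _ _ (by decide),
      aLoop_lit "pom.xml" _ _ _ (by decide),
      aLoop_lit "build.gradle" _ _ _ (by decide),
      aLoop_lit "build.gradle.kts" _ _ _ (by decide),
      aLoop_lit "lerna.json" _ _ _ (by decide),
      aLoop_lit "pnpm-workspace.yaml" _ _ _ (by decide),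
      aLoop_lit "nx.json" _ _ _ (by decide),
      aLoop_lit "rush.json" _ _ _ (by decide),
      aLoop_lit "turbo.json" _ _ _ (by decide),
      aLoop_lit "tsconfig.json" _ _ _ (by decide),
      aLoop_lit "Dockerfile" _ _ _ (by decide),
      aLoop_lit "docker-compose.yml" _ _ _ (by decide),
      aLoop_lit "docker-compose.yaml" _ _ _ (by decide),
      aLoop_lit "Makefile" _ _ _ (by decide),
      aLoop_lit "README.md" _ _ _ (by decide),
      aLoop_lit "CHANGELOG.md" _ _ _ (by decide),
      aLoop_glob ".github/workflows/*.yml" _ _ _ (by decide),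
      aLoop_glob ".github/workflows/*.yaml" _ _ _ (by decide),
      aLoop_lit ".gitlab-ci.yml" _ _ _ (by decide),
      aLoop_nil,
      glob_lit "package.json".toList (by decide) name,
      glob_lit "pyproject.toml".toList (by decide) name,
      glob_lit "Cargo.toml".toList (by decide) name,
      glob_lit "go.mod".toList (by decide) name,
      glob_lit "setup.cfg".toList (by decide) name,
      glob_lit "setup.py".toList (by decide) name,
      glob_lit "pom.xml".toList (by decide) name,
      glob_lit "build.gradle".toList (by decide) name,
      glob_lit "build.gradle.kts".toList (by decide) name,
      glob_lit "lerna.json".toList (by decide) name,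
      glob_lit "pnpm-workspace.yaml".toList (by decide) name,
      glob_lit "nx.json".toList (by decide) name,
      glob_lit "rush.json".toList (by decide) name,
      glob_lit "turbo.json".toList (by decide) name,
      glob_lit "tsconfig.json".toList (by decide) name,
      glob_lit "Dockerfile".toList (by decide) name,
      glob_lit "docker-compose.yml".toList (by decide) name,
      glob_lit "docker-compose.yaml".toList (by decide) name,
      glob_lit "Makefile".toList (by decide) name,
      glob_lit "README.md".toList (by decide) name,
      glob_lit "CHANGELOG.md".toList (by decide) name,
      glob_lit ".gitlab-ci.yml".toList (by decide) name,
      glob_yml, glob_yaml]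
  rw [Bool.eq_iff_iff]
  simp only [Bool.or_eq_true, Bool.and_eq_true, decide_eq_true_eq, Bool.false_eq_true, or_false,
    PySem.Set.contains_iff, bExactNames, PySem.Set.mem_ofList, List.mem_cons, List.not_mem_nil]
  constructor
  · rintro (h|h|h|h|h|h|h|h|h|h|h|h|h|h|h|h|h|h|h|h|h|h|h|h)
    · exact Or.inl (Or.inl h)
    · exact Or.inl (Or.inr (Or.inl h))
    · exact Or.inl (Or.inr (Or.inr (Or.inl h)))
    · exact Or.inl (Or.inr (Or.inr (Or.inr (Or.inl h))))
    · exact Or.inl (Or.inr (Or.inr (Or.inr (Or.inr (Or.inl h)))))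
    · exact Or.inl (Or.inr (Or.inr (Or.inr (Or.inr (Or.inr (Or.inl h))))))
    · exact Or.inl (Or.inr (Or.inr (Or.inr (Or.inr (Or.inr (Or.inr (Or.inl h)))))))
    · exact Or.inl (Or.inr (Or.inr (Or.inr (Or.inr (Or.inr (Or.inr (Or.inr (Or.inl h))))))))
    · exact Or.inl (Or.inr (Or.inr (Or.inr (Or.inr (Or.inr (Or.inr (Or.inr (Or.inr (Or.inl h)))))))))
    · exact Or.inl (Or.inr (Or.inr (Or.inr (Or.inr (Or.inr (Or.inr (Or.inr (Or.inr (Or.inr (Or.inl h))))))))))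
    · exact Or.inl (Or.inr (Or.inr (Or.inr (Or.inr (Or.inr (Or.inr (Or.inr (Or.inr (Or.inr (Or.inr (Or.inl h)))))))))))
    · exact Or.inl (Or.inr (Or.inr (Or.inr (Or.inr (Or.inr (Or.inr (Or.inr (Or.inr (Or.inr (Or.inr (Or.inr (Or.inl h))))))))))))
    · exact Or.inl (Or.inr (Or.inr (Or.inr (Or.inr (Or.inr (Or.inr (Or.inr (Or.inr (Or.inr (Or.inr (Or.inr (Or.inr (Or.inl h)))))))))))))
    · exact Or.inl (Or.inr (Or.inr (Or.inr (Or.inr (Or.inr (Or.inr (Or.inr (Or.inr (Or.inr (Or.inr (Or.inr (Or.inr (Or.inr (Or.inl h))))))))))))))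
    · exact Or.inl (Or.inr (Or.inr (Or.inr (Or.inr (Or.inr (Or.inr (Or.inr (Or.inr (Or.inr (Or.inr (Or.inr (Or.inr (Or.inr (Or.inr (Or.inl h)))))))))))))))
    · exact Or.inl (Or.inr (Or.inr (Or.inr (Or.inr (Or.inr (Or.inr (Or.inr (Or.inr (Or.inr (Or.inr (Or.inr (Or.inr (Or.inr (Or.inr (Or.inr (Or.inl h))))))))))))))))
    · exact Or.inl (Or.inr (Or.inr (Or.inr (Or.inr (Or.inr (Or.inr (Or.inr (Or.inr (Or.inr (Or.inr (Or.inr (Or.inr (Or.inr (Or.inr (Or.inr (Or.inr (Or.inl h)))))))))))))))))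
    · exact Or.inl (Or.inr (Or.inr (Or.inr (Or.inr (Or.inr (Or.inr (Or.inr (Or.inr (Or.inr (Or.inr (Or.inr (Or.inr (Or.inr (Or.inr (Or.inr (Or.inr (Or.inr (Or.inl h))))))))))))))))))
    · exact Or.inl (Or.inr (Or.inr (Or.inr (Or.inr (Or.inr (Or.inr (Or.inr (Or.inr (Or.inr (Or.inr (Or.inr (Or.inr (Or.inr (Or.inr (Or.inr (Or.inr (Or.inr (Or.inr (Or.inl h)))))))))))))))))))
    · exact Or.inl (Or.inr (Or.inr (Or.inr (Or.inr (Or.inr (Or.inr (Or.inr (Or.inr (Or.inr (Or.inr (Or.inr (Or.inr (Or.inr (Or.inr (Or.inr (Or.inr (Or.inr (Or.inr (Or.inr (Or.inl h))))))))))))))))))))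
    · exact Or.inl (Or.inr (Or.inr (Or.inr (Or.inr (Or.inr (Or.inr (Or.inr (Or.inr (Or.inr (Or.inr (Or.inr (Or.inr (Or.inr (Or.inr (Or.inr (Or.inr (Or.inr (Or.inr (Or.inr (Or.inr (Or.inl h)))))))))))))))))))))
    · exact Or.inr ⟨h.1, Or.inl h.2⟩
    · exact Or.inr ⟨h.1, Or.inr h.2⟩
    · exact Or.inl (Or.inr (Or.inr (Or.inr (Or.inr (Or.inr (Or.inr (Or.inr (Or.inr (Or.inr (Or.inr (Or.inr (Or.inr (Or.inr (Or.inr (Or.inr (Or.inr (Or.inr (Or.inr (Or.inr (Or.inr (Or.inr (h))))))))))))))))))))))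
  · rintro (h | ⟨hP, hY | hA⟩)
    · rcases h with (h|h|h|h|h|h|h|h|h|h|h|h|h|h|h|h|h|h|h|h|h|h)
      · exact Or.inl h
      · exact Or.inr (Or.inl h)
      · exact Or.inr (Or.inr (Or.inl h))
      · exact Or.inr (Or.inr (Or.inr (Or.inl h)))
      · exact Or.inr (Or.inr (Or.inr (Or.inr (Or.inl h))))
      · exact Or.inr (Or.inr (Or.inr (Or.inr (Or.inr (Or.inl h)))))
      · exact Or.inr (Or.inr (Or.inr (Or.inr (Or.inr (Or.inr (Or.inl h))))))
      · exact Or.inr (Or.inr (Or.inr (Or.inr (Or.inr (Or.inr (Or.inr (Or.inl h)))))))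
      · exact Or.inr (Or.inr (Or.inr (Or.inr (Or.inr (Or.inr (Or.inr (Or.inr (Or.inl h))))))))
      · exact Or.inr (Or.inr (Or.inr (Or.inr (Or.inr (Or.inr (Or.inr (Or.inr (Or.inr (Or.inl h)))))))))
      · exact Or.inr (Or.inr (Or.inr (Or.inr (Or.inr (Or.inr (Or.inr (Or.inr (Or.inr (Or.inr (Or.inl h))))))))))
      · exact Or.inr (Or.inr (Or.inr (Or.inr (Or.inr (Or.inr (Or.inr (Or.inr (Or.inr (Or.inr (Or.inr (Or.inl h)))))))))))
      · exact Or.inr (Or.inr (Or.inr (Or.inr (Or.inr (Or.inr (Or.inr (Or.inr (Or.inr (Or.inr (Or.inr (Or.inr (Or.inl h))))))))))))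
      · exact Or.inr (Or.inr (Or.inr (Or.inr (Or.inr (Or.inr (Or.inr (Or.inr (Or.inr (Or.inr (Or.inr (Or.inr (Or.inr (Or.inl h)))))))))))))
      · exact Or.inr (Or.inr (Or.inr (Or.inr (Or.inr (Or.inr (Or.inr (Or.inr (Or.inr (Or.inr (Or.inr (Or.inr (Or.inr (Or.inr (Or.inl h))))))))))))))
      · exact Or.inr (Or.inr (Or.inr (Or.inr (Or.inr (Or.inr (Or.inr (Or.inr (Or.inr (Or.inr (Or.inr (Or.inr (Or.inr (Or.inr (Or.inr (Or.inl h)))))))))))))))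
      · exact Or.inr (Or.inr (Or.inr (Or.inr (Or.inr (Or.inr (Or.inr (Or.inr (Or.inr (Or.inr (Or.inr (Or.inr (Or.inr (Or.inr (Or.inr (Or.inr (Or.inl h))))))))))))))))
      · exact Or.inr (Or.inr (Or.inr (Or.inr (Or.inr (Or.inr (Or.inr (Or.inr (Or.inr (Or.inr (Or.inr (Or.inr (Or.inr (Or.inr (Or.inr (Or.inr (Or.inr (Or.inl h)))))))))))))))))
      · exact Or.inr (Or.inr (Or.inr (Or.inr (Or.inr (Or.inr (Or.inr (Or.inr (Or.inr (Or.inr (Or.inr (Or.inr (Or.inr (Or.inr (Or.inr (Or.inr (Or.inr (Or.inr (Or.inl h))))))))))))))))))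
      · exact Or.inr (Or.inr (Or.inr (Or.inr (Or.inr (Or.inr (Or.inr (Or.inr (Or.inr (Or.inr (Or.inr (Or.inr (Or.inr (Or.inr (Or.inr (Or.inr (Or.inr (Or.inr (Or.inr (Or.inl h)))))))))))))))))))
      · exact Or.inr (Or.inr (Or.inr (Or.inr (Or.inr (Or.inr (Or.inr (Or.inr (Or.inr (Or.inr (Or.inr (Or.inr (Or.inr (Or.inr (Or.inr (Or.inr (Or.inr (Or.inr (Or.inr (Or.inr (Or.inl h))))))))))))))))))))
      · exact Or.inr (Or.inr (Or.inr (Or.inr (Or.inr (Or.inr (Or.inr (Or.inr (Or.inr (Or.inr (Or.inr (Or.inr (Or.inr (Or.inr (Or.inr (Or.inr (Or.inr (Or.inr (Or.inr (Or.inr (Or.inr (Or.inr (Or.inr (h)))))))))))))))))))))))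
    · exact Or.inr (Or.inr (Or.inr (Or.inr (Or.inr (Or.inr (Or.inr (Or.inr (Or.inr (Or.inr (Or.inr (Or.inr (Or.inr (Or.inr (Or.inr (Or.inr (Or.inr (Or.inr (Or.inr (Or.inr (Or.inr (Or.inl ⟨hP, hY⟩)))))))))))))))))))))
    · exact Or.inr (Or.inr (Or.inr (Or.inr (Or.inr (Or.inr (Or.inr (Or.inr (Or.inr (Or.inr (Or.inr (Or.inr (Or.inr (Or.inr (Or.inr (Or.inr (Or.inr (Or.inr (Or.inr (Or.inr (Or.inr (Or.inr (Or.inl ⟨hP, hA⟩))))))))))))))))))))))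

-- ===== VERDICT (by name: the statement is the Claim_ definition above) =====
theorem matches_key_file_py_spec : Claim_equal_matches_key_file_py := by
  intro path _
  show matches_key_file_py path = matches_key_file_py_alt path
  unfold matches_key_file_py matches_key_file_py_alt
  simp only []
  rw [aName_eq, aLoop_eval]
  rw [Bool.eq_iff_iff]
  simp only [Bool.if_true_left, Bool.or_eq_true, Bool.and_eq_true, decide_eq_true_eq,
    PySem.Chars.startswith_iff, PySem.Chars.endswith_iff]
  by_cases hP : ".github/workflows/".toList <+: path.toList
  · rw [suffix_drop18_iff ".yml".toList path.toList hP (by decide) (by decide),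
        suffix_drop18_iff ".yaml".toList path.toList hP (by decide) (by decide)]
  · tauto
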